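-- pv_equiv track=rewrite | github.com/tanaka-chitete/university-of-california-berkeley | cs61a/Code/labwork/lw07/attempts/lab07.py | trade
-- ===== SOURCE A (Python) =====
-- def trade(first, second):
--     """Exchange the smallest prefixes of first and second that have equal sum.
--
--     >>> a = [1, 1, 3, 2, 1, 1, 4]
--     >>> b = [4, 3, 2, 7]
--     >>> trade(a, b) # Trades 1+1+3+2=7 for 4+3=7
--     'Deal!'
--     >>> a
--     [4, 3, 1, 1, 4]
--     >>> b
--     [1, 1, 3, 2, 2, 7]
--     >>> c = [3, 3, 2, 4, 1]
--     >>> trade(b, c)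
--     'No deal!'
--     >>> b
--     [1, 1, 3, 2, 2, 7]
--     >>> c
--     [3, 3, 2, 4, 1]
--     >>> trade(a, c)
--     'Deal!'
--     >>> a
--     [3, 3, 2, 1, 4]
--     >>> b
--     [1, 1, 3, 2, 2, 7]
--     >>> c
--     [4, 3, 1, 4, 1]
--     """
--     m, n = 1, 1
--
--     equal_prefix = lambda: sum(first[0:m]) == sum(second[0:n])
--     while m < len(first) and n < len(second) and not equal_prefix():
--         if sum(first[:m]) < sum(second[:n]):
--             m += 1
--         else:
--             n += 1
--
--     if equal_prefix():
--         first[:m], second[:n] = second[:n], first[:m]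
--         return 'Deal!'
--     else:
--         return 'No deal!'
-- ===== SOURCE B (Python) =====
-- def trade(first, second):
--     """Exchange the smallest prefixes of first and second that have equal sum.
--
--     Two pointers with incrementally maintained running prefix sums: O(m+n)
--     instead of re-summing slices each iteration. Performs the same in-place
--     swap as the original on a deal.
--     """
--     m, n = 1, 1
--     sa, sb = sum(first[:1]), sum(second[:1])
--     while m < len(first) and n < len(second) and sa != sb:
--         if sa < sb:
--             sa += first[m]
--             m += 1
--         else:
--             sb += second[n]
--             n += 1
--     if sa == sb:
--         first[:m], second[:n] = second[:n], first[:m]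
--         return 'Deal!'
--     return 'No deal!'
-- ===== Notes on version B (the rewrite author's own statement) =====
-- stated objective: faster
-- what changed: B maintains the two prefix sums incrementally as running accumulators (two pointers), instead of re-summing both slices from scratch on every loop test and branch, turning the quadratic scan into a single linear pass.
import Mathlib
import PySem

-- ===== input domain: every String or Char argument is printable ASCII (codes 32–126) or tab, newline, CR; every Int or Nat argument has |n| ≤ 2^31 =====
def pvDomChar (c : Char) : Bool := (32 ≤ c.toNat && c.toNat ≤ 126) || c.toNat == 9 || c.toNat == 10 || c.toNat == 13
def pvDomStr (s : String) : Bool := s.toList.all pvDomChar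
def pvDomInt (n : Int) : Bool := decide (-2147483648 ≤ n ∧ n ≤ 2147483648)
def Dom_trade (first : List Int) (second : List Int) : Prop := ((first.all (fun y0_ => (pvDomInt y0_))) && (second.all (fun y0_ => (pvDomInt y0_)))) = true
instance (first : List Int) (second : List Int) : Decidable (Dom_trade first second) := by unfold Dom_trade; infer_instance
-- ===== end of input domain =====

-- B replaces A's repeated slice re-summation with two pointers carrying running
-- prefix sums (objective: faster, asymptotic). A mutates its arguments in place on a
-- deal; B performs the same mutation in Python, but the equivalence proved here is
-- about the RETURN value only.

-- ===== PORT A =====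
-- sum(first[0:m]) with m a nonnegative loop counter: the slice is exactly `take m`.
def sumPre (l : List Int) (m : Nat) : Int := (l.take m).sum

-- A's while loop over counters m, n; returns their final values. The fuel is only a
-- totality guard: first.length + second.length steps always suffice (each iteration
-- increments m or n, and the loop stops once m or n reaches its list's length).
def tradeLoopA (first second : List Int) (fuel m n : Nat) : Nat × Nat :=
  match fuel with
  | 0 => (m, n)
  | fuel + 1 =>
    if m < first.length ∧ n < second.length ∧ ¬ (sumPre first m = sumPre second n) then
      if sumPre first m < sumPre second n then tradeLoopA first second fuel (m + 1) n
      else tradeLoopA first second fuel m (n + 1)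
    else (m, n)

def trade (first : List Int) (second : List Int) : String :=
  let p := tradeLoopA first second (first.length + second.length) 1 1
  if sumPre first p.1 = sumPre second p.2 then "Deal!" else "No deal!"

-- ===== PORT B =====
-- B's while loop: running sums sa, sb updated incrementally (first[m] = getD m 0, a
-- valid index under the loop condition). Same totality fuel as above.
def tradeLoopB (first second : List Int) (fuel m n : Nat) (sa sb : Int) : Int × Int :=
  match fuel with
  | 0 => (sa, sb)
  | fuel + 1 =>
    if m < first.length ∧ n < second.length ∧ sa ≠ sb then
      if sa < sb then tradeLoopB first second fuel (m + 1) n (sa + first.getD m 0) sb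
      else tradeLoopB first second fuel m (n + 1) sa (sb + second.getD n 0)
    else (sa, sb)

def trade_alt (first : List Int) (second : List Int) : String :=
  let q := tradeLoopB first second (first.length + second.length) 1 1
             (first.take 1).sum (second.take 1).sum
  if q.1 = q.2 then "Deal!" else "No deal!"

-- ===== PRECONDITION & SPEC =====
def Spec_trade (first : List Int) (second : List Int) (out : String) : Prop := out = trade_alt first second
instance (first : List Int) (second : List Int) (out : String) : Decidable (Spec_trade first second out) := by unfold Spec_trade; infer_instance

-- ===== CLAIM (what is proved, stated in full; the proofs are below) =====
def Claim_equal_trade : Prop := ∀ (first : List Int) (second : List Int), Dom_trade first second → Spec_trade first second (trade first second)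

-- ===== LEMMAS AND PROOFS =====

theorem sumPre_succ (l : List Int) (m : Nat) (h : m < l.length) :
    sumPre l (m + 1) = sumPre l m + l.getD m 0 := by
  unfold sumPre
  rw [List.take_add_one, List.sum_append]
  simp [List.getElem?_eq_getElem h, List.getD]

-- B's loop, started on the true prefix sums, computes the prefix sums at A's final counters.
theorem loopB_eq_loopA (first second : List Int) (fuel : Nat) : ∀ (m n : Nat),
    tradeLoopB first second fuel m n (sumPre first m) (sumPre second n)
      = (sumPre first (tradeLoopA first second fuel m n).1,
         sumPre second (tradeLoopA first second fuel m n).2) := by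
  induction fuel with
  | zero => intro m n; rfl
  | succ fuel ih =>
    intro m n
    by_cases h : m < first.length ∧ n < second.length ∧ ¬ (sumPre first m = sumPre second n)
    · have hB : m < first.length ∧ n < second.length ∧ sumPre first m ≠ sumPre second n := h
      rw [tradeLoopA, tradeLoopB, if_pos h, if_pos hB]
      by_cases hlt : sumPre first m < sumPre second n
      · rw [if_pos hlt, if_pos hlt, ← sumPre_succ first m h.1]; exact ih _ _
      · rw [if_neg hlt, if_neg hlt, ← sumPre_succ second n h.2.1]; exact ih _ _
    · have hB : ¬ (m < first.length ∧ n < second.length ∧ sumPre first m ≠ sumPre second n) := h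
      rw [tradeLoopA, tradeLoopB, if_neg h, if_neg hB]

-- ===== VERDICT (by name: the statement is the Claim_ definition above) =====
theorem trade_spec : Claim_equal_trade := by
  intro first second _
  unfold Spec_trade trade trade_alt
  have h1 : (first.take 1).sum = sumPre first 1 := rfl
  have h2 : (second.take 1).sum = sumPre second 1 := rfl
  rw [h1, h2, loopB_eq_loopA]
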